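-- pv_equiv track=rewrite | github.com/maxim-zhao/shining-force-gaiden-1-gg-translation | src/tools.py | bytes_to_japanese
-- ===== SOURCE A (Python) =====
-- codes = {
--     0xc8: "<use dictionary>",
--     0xc9: "<line>",
--     0xcb: "<delay 02>",
--     0xcc: "<number>",
--     0xcd: "<name>",
--     0xcf: "<party leader>",
--     0xd1: "<item>",
--     0xd2: "<spell>",
--     0xd3: "<class name>",
--     0xd4: "<wait more>",
--     0xd6: "<delay 01>",
--     0xd7: "<wait>",
--     0xd8: "<delay 03>",
--     0xd9: "<clear screen>",
--     0xda: "<end>"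
-- }
--
-- character_map = "█" \
--     "　０１２３４５６７８９" \
--     "あいうえおかきくけこさしすせそたちつてとなにぬねのはひふへ" \
--     "ほまみむめもやゆよらりるれろわんをぁぃぅぇぉゃゅょっアイウ" \
--     "エオカキクケコサシスセソタチツテトナニヌネノハヒフヘホマミ" \
--     "ムメモヤユヨラリルレロワンヲァィゥェォャュョッ" \
--     "゛゜█████ー％／ＡＤＦＧＨＬＭＰＴＶ？・！"
--
-- def bytes_to_japanese(data):
--     s = ""
--     # The encoding puts ten-ten indices before the characters they affect.
--     # In Unicode, these conveniently map to the character plus 1 or 2.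
--     tenten = 0
--     for index in data:
--         if index in codes:
--             s += codes[index]
--         elif index >= len(character_map):
--             raise Exception(f"Unhandled byte value <{hex(index)}>")
--         else:
--             c = character_map[index]
--             if c == "゛":
--                 tenten = 1
--             elif c == "゜":
--                 tenten = 2
--             else:
--                 s += chr(ord(c) + tenten)
--                 tenten = 0
--     return s
-- ===== SOURCE B (Python) =====
-- # B: same decoding, decomposed into a tokenize pass (bytes -> tagged tokens)
-- # and a render fold carrying the ten-ten accumulator.
--
-- codes = {200: '<use dictionary>', 201: '<line>', 203: '<delay 02>', 204: '<number>', 205: '<name>', 207: '<party leader>', 209: '<item>', 210: '<spell>', 211: '<class name>', 212: '<wait more>', 214: '<delay 01>', 215: '<wait>', 216: '<delay 03>', 217: '<clear screen>', 218: '<end>'}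
--
-- character_map = '█\u3000０１２３４５６７８９あいうえおかきくけこさしすせそたちつてとなにぬねのはひふへほまみむめもやゆよらりるれろわんをぁぃぅぇぉゃゅょっアイウエオカキクケコサシスセソタチツテトナニヌネノハヒフヘホマミムメモヤユヨラリルレロワンヲァィゥェォャュョッ゛゜█████ー％／ＡＤＦＧＨＬＭＰＴＶ？・！'
--
--
-- def bytes_to_japanese(data):
--     # pass 1: tokenize
--     tokens = []
--     for index in data:
--         if index in codes:
--             tokens.append(('code', codes[index]))
--         elif index >= len(character_map) or index < 0:
--             raise Exception(f"Unhandled byte value <{hex(index)}>")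
--         else:
--             c = character_map[index]
--             if c == "\u309b":
--                 tokens.append(('dakuten', 1))
--             elif c == "\u309c":
--                 tokens.append(('dakuten', 2))
--             else:
--                 tokens.append(('char', c))
--     # pass 2: render with a ten-ten accumulator
--     out = ""
--     tenten = 0
--     for kind, v in tokens:
--         if kind == 'code':
--             out += v
--         elif kind == 'dakuten':
--             tenten = v
--         else:
--             out += chr(ord(v) + tenten)
--             tenten = 0
--     return out
-- ===== Notes on version B (the rewrite author's own statement) =====
-- stated objective: alternative
-- what changed: A's single stateful loop is decomposed into a tokenize pass (bytes to tagged code/dakuten/char tokens, validating bytes up front) and a separate render fold that carries the ten-ten accumulator over the token list.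
-- outside the precondition, e.g. on bytes_to_japanese([-1]): A returns '！', B raises Exception
import Mathlib
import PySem

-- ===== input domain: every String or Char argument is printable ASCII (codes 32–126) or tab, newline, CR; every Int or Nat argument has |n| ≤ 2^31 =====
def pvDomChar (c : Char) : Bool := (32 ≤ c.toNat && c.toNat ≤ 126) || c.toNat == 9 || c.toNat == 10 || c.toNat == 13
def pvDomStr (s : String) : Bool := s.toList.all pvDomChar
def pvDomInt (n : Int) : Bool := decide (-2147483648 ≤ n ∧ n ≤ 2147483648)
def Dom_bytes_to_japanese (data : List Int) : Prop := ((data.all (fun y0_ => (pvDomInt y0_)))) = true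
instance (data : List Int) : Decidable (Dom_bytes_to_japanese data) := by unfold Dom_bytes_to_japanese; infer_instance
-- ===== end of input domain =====

-- B re-decomposes A's single stateful loop into a tokenize pass and a render fold; return values agree on Pre_.

-- ===== PORT A =====
-- the module-level `codes` dict and `character_map` string
def pvCodes : PySem.Dict Int (List Char) := PySem.Dict.ofList [(200, "<use dictionary>".toList), (201, "<line>".toList), (203, "<delay 02>".toList), (204, "<number>".toList), (205, "<name>".toList), (207, "<party leader>".toList), (209, "<item>".toList), (210, "<spell>".toList), (211, "<class name>".toList), (212, "<wait more>".toList), (214, "<delay 01>".toList), (215, "<wait>".toList), (216, "<delay 03>".toList), (217, "<clear screen>".toList), (218, "<end>".toList)]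

def pvCharMap : List Char := "█　０１２３４５６７８９あいうえおかきくけこさしすせそたちつてとなにぬねのはひふへほまみむめもやゆよらりるれろわんをぁぃぅぇぉゃゅょっアイウエオカキクケコサシスセソタチツテトナニヌネノハヒフヘホマミムメモヤユヨラリルレロワンヲァィゥェォャュョッ゛゜█████ー％／ＡＤＦＧＨＬＭＰＴＶ？・！".toList

-- A's loop over `data` with state (s, tenten); `none` = the raised Exception / IndexError
def pvLoopA : List Int → List Char → Int → Option (List Char)
  | [], s, _ => some s
  | i :: rest, s, tenten =>
    match PySem.Dict.get? pvCodes i with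
    | some cs => pvLoopA rest (s ++ cs) tenten
    | none =>
      if i ≥ PySem.List.len pvCharMap then none   -- raise Exception
      else
        match PySem.List.pyGet? pvCharMap i with  -- character_map[index] (negative wraps)
        | none => none                            -- IndexError (index < -len)
        | some c =>
          if c = '゛' then pvLoopA rest s 1
          else if c = '゜' then pvLoopA rest s 2
          else pvLoopA rest (s ++ [Char.ofNat ((c.toNat + tenten).toNat)]) 0

def bytes_to_japanese (data : List Int) : String := String.ofList ((pvLoopA data [] 0).getD [])

-- ===== PORT B =====
inductive PvTok
  | code : List Char → PvTok
  | dakuten : Int → PvTok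
  | chr : Char → PvTok
deriving DecidableEq, Repr

-- B's pass 1: bytes to tagged tokens; `none` = the raised Exception
def pvTokenize : List Int → Option (List PvTok)
  | [] => some []
  | i :: rest =>
    match PySem.Dict.get? pvCodes i with
    | some cs => (pvTokenize rest).map (PvTok.code cs :: ·)
    | none =>
      if i ≥ PySem.List.len pvCharMap ∨ i < 0 then none  -- raise Exception
      else
        match PySem.List.pyGet? pvCharMap i with
        | none => none
        | some c =>
          if c = '゛' then (pvTokenize rest).map (PvTok.dakuten 1 :: ·)
          else if c = '゜' then (pvTokenize rest).map (PvTok.dakuten 2 :: ·)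
          else (pvTokenize rest).map (PvTok.chr c :: ·)

-- B's pass 2: render fold with state (out, tenten)
def pvRender : List PvTok → List Char → Int → List Char
  | [], s, _ => s
  | PvTok.code cs :: ts, s, t => pvRender ts (s ++ cs) t
  | PvTok.dakuten n :: ts, s, _ => pvRender ts s n
  | PvTok.chr c :: ts, s, t => pvRender ts (s ++ [Char.ofNat ((c.toNat + t).toNat)]) 0

def bytes_to_japanese_alt (data : List Int) : String :=
  match pvTokenize data with
  | none => ""
  | some ts => String.ofList (pvRender ts [] 0)

-- ===== PRECONDITION & SPEC =====
-- Pre_ excludes bytes on which A raises (≥ len(character_map) and not a control code, or < -len),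
-- and also in-range NEGATIVE bytes, where A's returned character is an artefact of Python's
-- negative-index wraparound; B naturally raises there.
def Pre_bytes_to_japanese (data : List Int) : Prop :=
  ∀ i ∈ data, PySem.Dict.contains pvCodes i = true ∨ (0 ≤ i ∧ i < 145)
instance (data : List Int) : Decidable (Pre_bytes_to_japanese data) := by
  unfold Pre_bytes_to_japanese; infer_instance

def pvWitness_bytes_to_japanese : List Int := [1, 33, 100, 201, 110, 39]

def Spec_bytes_to_japanese (data : List Int) (out : String) : Prop := out = bytes_to_japanese_alt data
instance (data : List Int) (out : String) : Decidable (Spec_bytes_to_japanese data out) := by unfold Spec_bytes_to_japanese; infer_instance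

-- ===== CLAIM (what is proved, stated in full; the proofs are below) =====
def Claim_equal_bytes_to_japanese : Prop := ∀ (data : List Int), Dom_bytes_to_japanese data → Pre_bytes_to_japanese data → Spec_bytes_to_japanese data (bytes_to_japanese data)

-- ===== LEMMAS AND PROOFS =====
set_option maxRecDepth 40000 in
lemma pvCharMap_len : PySem.List.len pvCharMap = 145 := by decide

set_option maxRecDepth 40000 in
lemma pvLoopA_eq_tokenize_render (data : List Int)
    (h : Pre_bytes_to_japanese data) (s : List Char) (t : Int) :
    pvLoopA data s t = (pvTokenize data).map (fun ts => pvRender ts s t) := by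
  induction data generalizing s t with
  | nil => simp only [pvLoopA, pvTokenize, Option.map_some, pvRender]
  | cons i rest ih =>
    have hi := h i (List.mem_cons_self ..)
    have hrest : Pre_bytes_to_japanese rest := fun j hj => h j (List.mem_cons_of_mem _ hj)
    match hc : PySem.Dict.get? pvCodes i with
    | some cs =>
      simp only [pvLoopA, pvTokenize, hc, ih hrest]
      cases pvTokenize rest with
      | none => simp only [Option.map_none]
      | some ts => simp only [Option.map_some, pvRender]
    | none =>
      have hrange : 0 ≤ i ∧ i < 145 := by
        rcases hi with hi | hi
        · exfalso
          rw [PySem.Dict.contains_eq_isSome_get?, hc] at hi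
          simp at hi
        · exact hi
      have hnotge : ¬ i ≥ PySem.List.len pvCharMap := by rw [pvCharMap_len]; omega
      have hnotor : ¬ (i ≥ PySem.List.len pvCharMap ∨ i < 0) := by rw [pvCharMap_len]; omega
      have hlt : i.toNat < pvCharMap.length := by
        have h2 := pvCharMap_len; rw [PySem.List.len_eq] at h2; omega
      have hget : PySem.List.pyGet? pvCharMap i = some (pvCharMap[i.toNat]'hlt) := by
        rw [PySem.List.pyGet?_of_nonneg pvCharMap hrange.1, List.getElem?_eq_getElem hlt]
      obtain ⟨c, hget⟩ : ∃ c, PySem.List.pyGet? pvCharMap i = some c := ⟨_, hget⟩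
      simp only [pvLoopA, pvTokenize, hc]
      rw [if_neg hnotge, if_neg hnotor, hget]
      simp only []
      by_cases h1 : c = '\u309b'
      · simp only [if_pos h1, ih hrest]
        cases pvTokenize rest with
        | none => simp only [Option.map_none]
        | some ts => simp only [Option.map_some, pvRender]
      · by_cases h2 : c = '\u309c'
        · simp only [if_neg h1, if_pos h2, ih hrest]
          cases pvTokenize rest with
          | none => simp only [Option.map_none]
          | some ts => simp only [Option.map_some, pvRender]
        · simp only [if_neg h1, if_neg h2, ih hrest]
          cases pvTokenize rest with
          | none => simp only [Option.map_none]
          | some ts => simp only [Option.map_some, pvRender]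

-- ===== VERDICT (by name: the statement is the Claim_ definition above) =====
theorem bytes_to_japanese_spec : Claim_equal_bytes_to_japanese := by
  intro data _ hpre
  unfold Spec_bytes_to_japanese bytes_to_japanese bytes_to_japanese_alt
  rw [pvLoopA_eq_tokenize_render data hpre [] 0]
  cases htk : pvTokenize data with
  | none => rfl
  | some ts => rfl
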